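-- pv_equiv track=rewrite | github.com/Nachopedrero/examen-ordinaria | ej6.py | agruparnumero
-- ===== SOURCE A (Python) =====
-- def agruparnumero(tropa):
--     numeros = {}
--     for i in tropa:
--         numero = i[2:6]
--         if numero in numeros:
--             numeros[numero].append(i)
--         else:
--             numeros[numero] = [i]
--     return numeros
-- ===== SOURCE B (Python) =====
-- def agruparnumero(tropa):
--     claves = list(dict.fromkeys(i[2:6] for i in tropa))
--     return {k: [i for i in tropa if i[2:6] == k] for k in claves}
-- ===== Notes on version B (the rewrite author's own statement) =====
-- stated objective: alternative
-- what changed: B replaces A's single-pass dict accumulation (append-or-create per element) with a two-phase scheme: first an ordered dedup of the substring keys, then one dict comprehension that forms each group by filtering the whole list per key.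
import Mathlib
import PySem

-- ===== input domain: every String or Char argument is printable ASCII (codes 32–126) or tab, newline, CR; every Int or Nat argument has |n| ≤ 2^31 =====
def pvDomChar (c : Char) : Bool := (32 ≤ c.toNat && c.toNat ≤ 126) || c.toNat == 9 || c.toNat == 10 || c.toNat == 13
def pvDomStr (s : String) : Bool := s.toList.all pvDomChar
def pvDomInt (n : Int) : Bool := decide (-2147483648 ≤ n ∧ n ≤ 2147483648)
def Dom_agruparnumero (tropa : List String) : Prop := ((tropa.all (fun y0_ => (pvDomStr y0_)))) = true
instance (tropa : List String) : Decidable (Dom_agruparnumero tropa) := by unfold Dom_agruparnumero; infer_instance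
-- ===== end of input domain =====

-- B builds the dict by ordered key-dedup followed by one filter per key, instead of
-- A's single-pass append-or-create accumulation; objective: alternative (not faster).

-- i[2:6]
def pvKey (i : String) : String := PySem.Str.slice i (some 2) (some 6)

-- ===== PORT A =====
-- numeros[numero] = numeros.get-or-[] ++ [i]  (Python's if-in/append-else-set, position kept)
def agruparnumero (tropa : List String) : List (String × List String) :=
  (tropa.foldl
    (fun numeros i => numeros.modify (pvKey i) [] (· ++ [i]))
    (PySem.Dict.empty : PySem.Dict String (List String))).items

-- ===== PORT B =====
-- claves = list(dict.fromkeys(...)); then {k: [i for i in tropa if i[2:6] == k] for k in claves}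
def agruparnumero_alt (tropa : List String) : List (String × List String) :=
  (PySem.List.dedup (tropa.map pvKey)).map
    (fun k => (k, tropa.filter (fun i => pvKey i == k)))

-- ===== PRECONDITION & SPEC =====
def Spec_agruparnumero (tropa : List String) (out : List (String × List String)) : Prop := out = agruparnumero_alt tropa
instance (tropa : List String) (out : List (String × List String)) : Decidable (Spec_agruparnumero tropa out) := by unfold Spec_agruparnumero; infer_instance

-- ===== CLAIM (what is proved, stated in full; the proofs are below) =====
def Claim_equal_agruparnumero : Prop := ∀ (tropa : List String), Dom_agruparnumero tropa → Spec_agruparnumero tropa (agruparnumero tropa)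

-- ===== LEMMAS AND PROOFS =====

-- A's loop: what each key's group ends up being.
theorem pvGetD_loop (l : List String) (d : PySem.Dict String (List String)) (c : String) :
    (l.foldl (fun d i => d.modify (pvKey i) [] (· ++ [i])) d).getD c []
      = d.getD c [] ++ l.filter (fun i => pvKey i == c) := by
  induction l generalizing d with
  | nil => simp
  | cons x xs ih =>
    simp only [List.foldl_cons, ih, List.filter_cons]
    rw [PySem.Dict.getD_modify]
    by_cases h : c = pvKey x
    · subst h; simp
    · have h' : ¬ pvKey x = c := fun hh => h hh.symm
      simp [h, h']

theorem agruparnumero_spec : Claim_equal_agruparnumero := by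
  intro tropa _
  unfold Spec_agruparnumero agruparnumero agruparnumero_alt
  have hnd : (tropa.foldl (fun d i => d.modify (pvKey i) [] (· ++ [i]))
      (PySem.Dict.empty : PySem.Dict String (List String))).keys.Nodup := by
    exact PySem.Dict.nodup_keys_foldl_modify_key tropa pvKey [] (fun _ i => (· ++ [i])) _
      PySem.Dict.nodup_keys_empty
  rw [PySem.Dict.items_eq_map_keys _ hnd []]
  have hkeys : (tropa.foldl (fun d i => d.modify (pvKey i) [] (· ++ [i]))
      (PySem.Dict.empty : PySem.Dict String (List String))).keys
        = PySem.List.dedup (tropa.map pvKey) := by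
    rw [PySem.Dict.keys_foldl_modify_key tropa pvKey [] (fun _ i => (· ++ [i])) _]
    simp [PySem.Dict.keys_empty, PySem.Set.update_nil_left]
  rw [hkeys]
  refine List.map_congr_left ?_
  intro k _
  rw [pvGetD_loop, PySem.Dict.getD_empty]
  simp
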